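-- pv_equiv track=rewrite | github.com/MLRushOrg/ChatGLM2-6B | process.py | cut_to_session
-- ===== SOURCE A (Python) =====
-- def cut_to_session(chat_list, hour=3):
--     session_list = []
--     start = 0
--     end = 1
--     for end in range(1, len(chat_list)):
--         if chat_list[end]['msgCreateTime'] - chat_list[end-1]['msgCreateTime'] > hour*3600:
--             session_list.append(chat_list[start:end])
--             start = end
--     session_list.append(chat_list[start:])
--     return session_list
-- ===== SOURCE B (Python) =====
-- def cut_to_session(chat_list, hour=3):
--     gap = hour * 3600
--     done = []
--     cur = []
--     prev = None
--     for msg in chat_list: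
--         if prev is not None and msg['msgCreateTime'] - prev['msgCreateTime'] > gap:
--             done.append(cur)
--             cur = []
--         cur.append(msg)
--         prev = msg
--     return done + [cur]
-- ===== Notes on version B (the rewrite author's own statement) =====
-- stated objective: alternative
-- what changed: Replaces A's index-range scan with slicing (chat_list[start:end] cut points) by an element-wise fold that never indexes or slices: it walks the messages themselves, carrying the finished sessions, the current session and the previous message, growing the current session one element at a time.
import Mathlib
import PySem

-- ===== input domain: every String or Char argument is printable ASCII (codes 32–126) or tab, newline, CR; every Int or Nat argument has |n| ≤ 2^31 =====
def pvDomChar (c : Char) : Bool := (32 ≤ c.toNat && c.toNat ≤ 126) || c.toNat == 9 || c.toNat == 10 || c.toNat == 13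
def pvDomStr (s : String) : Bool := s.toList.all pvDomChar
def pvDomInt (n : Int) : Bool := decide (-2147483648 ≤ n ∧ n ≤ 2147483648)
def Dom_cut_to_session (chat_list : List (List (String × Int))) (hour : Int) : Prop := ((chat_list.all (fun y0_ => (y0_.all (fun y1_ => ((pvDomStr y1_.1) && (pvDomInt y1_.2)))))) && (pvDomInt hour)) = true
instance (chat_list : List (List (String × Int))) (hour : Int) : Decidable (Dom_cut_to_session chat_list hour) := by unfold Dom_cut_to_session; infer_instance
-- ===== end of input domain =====

-- B replaces A's index-range scan with slicing by an element-wise fold that never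
-- indexes or slices (carrying done sessions / current session / previous message);
-- alternative decomposition, same cost.


-- ===== PORT A =====
-- d['msgCreateTime'] — total form; Pre_ excludes the missing-key KeyError
def pvMct (d : List (String × Int)) : Int := PySem.Dict.getD (PySem.Dict.mk d) "msgCreateTime" 0

def cut_to_session (chat_list : List (List (String × Int))) (hour : Int) : List (List (List (String × Int))) :=
  let st := (PySem.List.pyRange 1 (chat_list.length : Int) 1).foldl
    (fun (s : List (List (List (String × Int))) × Int) e =>
      if pvMct (PySem.List.pyGetD chat_list e []) - pvMct (PySem.List.pyGetD chat_list (e - 1) []) > hour * 3600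
      then (s.1 ++ [PySem.List.slice chat_list (some s.2) (some e)], e)
      else s) ([], 0)
  st.1 ++ [PySem.List.slice chat_list (some st.2) none]

-- ===== PORT B =====
-- the loop body of Source B: state = (done, cur, prev)
def pvStepB (gap : Int)
    (s : List (List (List (String × Int))) × List (List (String × Int)) × Option (List (String × Int)))
    (msg : List (String × Int)) :
    List (List (List (String × Int))) × List (List (String × Int)) × Option (List (String × Int)) :=
  match s.2.2 with
  | some p =>
    if pvMct msg - pvMct p > gap then (s.1 ++ [s.2.1], [] ++ [msg], some msg)
    else (s.1, s.2.1 ++ [msg], some msg)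
  | none => (s.1, s.2.1 ++ [msg], some msg)

def cut_to_session_alt (chat_list : List (List (String × Int))) (hour : Int) : List (List (List (String × Int))) :=
  let gap := hour * 3600
  let st := chat_list.foldl (pvStepB gap) ([], [], none)
  st.1 ++ [st.2.1]

-- ===== PRECONDITION & SPEC =====
-- Pre_ excludes exactly the inputs where Python A raises KeyError: a list of length ≥ 2
-- containing an element without the 'msgCreateTime' key (with length ≤ 1 no element is looked up).
def Pre_cut_to_session (chat_list : List (List (String × Int))) (hour : Int) : Prop :=
  chat_list.length ≤ 1 ∨ ∀ d ∈ chat_list, (PySem.Dict.mk d).contains "msgCreateTime" = true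
instance (chat_list : List (List (String × Int))) (hour : Int) : Decidable (Pre_cut_to_session chat_list hour) := by unfold Pre_cut_to_session; infer_instance
def pvWitness_cut_to_session : (List (List (String × Int))) × Int := ([[("msgCreateTime", 0)], [("msgCreateTime", 20000)]], 3)

def Spec_cut_to_session (chat_list : List (List (String × Int))) (hour : Int) (out : List (List (List (String × Int)))) : Prop := out = cut_to_session_alt chat_list hour
instance (chat_list : List (List (String × Int))) (hour : Int) (out : List (List (List (String × Int)))) : Decidable (Spec_cut_to_session chat_list hour out) := by unfold Spec_cut_to_session; infer_instance

-- ===== CLAIM (what is proved, stated in full; the proofs are below) =====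
def Claim_equal_cut_to_session : Prop := ∀ (chat_list : List (List (String × Int))) (hour : Int), Dom_cut_to_session chat_list hour → Pre_cut_to_session chat_list hour → Spec_cut_to_session chat_list hour (cut_to_session chat_list hour)

-- ===== LEMMAS AND PROOFS =====

-- reference: sessions of ms given previous message p; pvAttach cur prepends cur to the first group
def pvAttach (cur : List (List (String × Int))) : List (List (List (String × Int))) → List (List (List (String × Int)))
  | [] => [cur]
  | g :: gs => (cur ++ g) :: gs

def pvSess (gap : Int) : List (String × Int) → List (List (String × Int)) → List (List (List (String × Int)))
  | _, [] => [[]]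
  | p, m :: ms =>
    if pvMct m - pvMct p > gap then [] :: pvAttach [m] (pvSess gap m ms)
    else pvAttach [m] (pvSess gap m ms)

def pvSessTop (gap : Int) : List (List (String × Int)) → List (List (List (String × Int)))
  | [] => [[]]
  | c :: cs => pvAttach [c] (pvSess gap c cs)

theorem pvAttach_attach (cur : List (List (String × Int))) (m : List (String × Int))
    (S : List (List (List (String × Int)))) :
    pvAttach cur (pvAttach [m] S) = pvAttach (cur ++ [m]) S := by
  cases S <;> simp [pvAttach]

-- ---- B side: the fold equals done ++ pvAttach cur (pvSess gap p ms) ----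
theorem pvFoldB (gap : Int) :
    ∀ (ms : List (List (String × Int))) (done : List (List (List (String × Int))))
      (cur : List (List (String × Int))) (p : List (String × Int)),
      (ms.foldl (pvStepB gap) (done, cur, some p)).1 ++ [(ms.foldl (pvStepB gap) (done, cur, some p)).2.1]
      = done ++ pvAttach cur (pvSess gap p ms) := by
  intro ms
  induction ms with
  | nil => intro done cur p; simp [pvSess, pvAttach]
  | cons m ms ih =>
    intro done cur p
    by_cases h : pvMct m - pvMct p > gap
    · simp only [List.foldl_cons, pvStepB, h, if_pos, pvSess]
      rw [ih (done ++ [cur]) ([] ++ [m]) m]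
      simp [pvAttach]
    · simp only [List.foldl_cons, pvStepB, h, pvSess, if_false]
      rw [ih done (cur ++ [m]) m]
      simp [pvAttach_attach]

-- ---- A side ----
-- slices of cl between consecutive Int boundaries (A's fold result shape)
def pvCuts (cl : List (List (String × Int))) : Int → List Int → List (List (List (String × Int)))
  | s, [] => [PySem.List.slice cl (some s) none]
  | s, b :: bs => PySem.List.slice cl (some s) (some b) :: pvCuts cl b bs

-- Nat version: break recorded as k means boundary k+1
def pvCutsN (cl : List (List (String × Int))) : Nat → List Nat → List (List (List (String × Int)))
  | s, [] => [cl.drop s]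
  | s, k :: bs => ((cl.drop s).take (k + 1 - s)) :: pvCutsN cl (k + 1) bs

def pvBreaks (gap : Int) (cl : List (List (String × Int))) : List Nat :=
  (List.range (cl.length - 1)).filter
    (fun k => decide (pvMct (cl.getD (k + 1) []) - pvMct (cl.getD k []) > gap))

theorem pvFoldA (cl : List (List (String × Int))) (p : Int → Prop) [DecidablePred p] :
    ∀ (is : List Int) (acc : List (List (List (String × Int)))) (s : Int),
      (is.foldl
        (fun (st : List (List (List (String × Int))) × Int) e =>
          if p e then (st.1 ++ [PySem.List.slice cl (some st.2) (some e)], e) else st) (acc, s)).1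
      ++ [PySem.List.slice cl
            (some (is.foldl
              (fun (st : List (List (List (String × Int))) × Int) e =>
                if p e then (st.1 ++ [PySem.List.slice cl (some st.2) (some e)], e) else st) (acc, s)).2)]
      = acc ++ pvCuts cl s (is.filter (fun i => decide (p i))) := by
  intro is
  induction is with
  | nil => intro acc s; simp [pvCuts]
  | cons i is ih =>
    intro acc s
    by_cases h : p i
    · simp only [List.foldl_cons, List.filter_cons, h, if_pos, decide_true]
      rw [ih (acc ++ [PySem.List.slice cl (some s) (some i)]) i]
      simp [pvCuts]
    · simp only [List.foldl_cons, List.filter_cons, h, decide_false, if_false]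
      exact ih acc s

def pvLift (k : Nat) : Int := 1 + (k : Int)

theorem pvLift_eq (k : Nat) : pvLift k = ((k + 1 : Nat) : Int) := by
  unfold pvLift; push_cast; ring

theorem pvCuts_cast (cl : List (List (String × Int))) :
    ∀ (bs : List Nat) (s : Nat),
      pvCuts cl (s : Int) (bs.map pvLift) = pvCutsN cl s bs := by
  intro bs
  induction bs with
  | nil =>
    intro s
    simp [pvCuts, pvCutsN, PySem.List.slice_from_natCast]
  | cons k bs ih =>
    intro s
    simp only [List.map_cons, pvCuts, pvCutsN, pvLift_eq, PySem.List.slice_natCast]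
    rw [ih (k + 1)]

theorem pvCutsN_shift (c : List (String × Int)) (cs : List (List (String × Int))) :
    ∀ (bs : List Nat) (s : Nat),
      pvCutsN (c :: cs) (s + 1) (bs.map (· + 1)) = pvCutsN cs s bs := by
  intro bs
  induction bs with
  | nil => intro s; simp [pvCutsN]
  | cons k bs ih =>
    intro s
    simp only [List.map_cons, pvCutsN, List.drop_succ_cons]
    rw [ih (k + 1)]
    congr 2
    omega

theorem pvCutsN_zero_shift (c : List (String × Int)) (cs : List (List (String × Int)))
    (bs : List Nat) :
    pvCutsN (c :: cs) 0 (bs.map (· + 1)) = pvAttach [c] (pvCutsN cs 0 bs) := by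
  cases bs with
  | nil => simp [pvCutsN, pvAttach]
  | cons k bs =>
    simp only [List.map_cons, pvCutsN, pvAttach, Nat.sub_zero, List.drop_zero,
      List.take_succ_cons, List.singleton_append]
    rw [pvCutsN_shift c cs bs (k + 1)]

theorem pvCutsN_breaks (gap : Int) :
    ∀ (cl : List (List (String × Int))), pvCutsN cl 0 (pvBreaks gap cl) = pvSessTop gap cl := by
  intro cl
  induction cl with
  | nil => simp [pvBreaks, pvCutsN, pvSessTop]
  | cons c cs ih =>
    cases cs with
    | nil => simp [pvBreaks, pvCutsN, pvSessTop, pvSess, pvAttach]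
    | cons m ms =>
      have hrange : List.range ((c :: m :: ms).length - 1)
          = 0 :: (List.range ((m :: ms).length - 1)).map (· + 1) := by
        simp [List.range_succ_eq_map]
      have hfilter : ∀ (l : List Nat),
          (l.map (· + 1)).filter
            (fun k => decide (pvMct ((c :: m :: ms).getD (k + 1) []) - pvMct ((c :: m :: ms).getD k []) > gap))
          = (l.filter
              (fun k => decide (pvMct ((m :: ms).getD (k + 1) []) - pvMct ((m :: ms).getD k []) > gap))).map (· + 1) := by
        intro l
        rw [List.filter_map]
        congr 1
      by_cases h : pvMct m - pvMct c > gap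
      · have hb : pvBreaks gap (c :: m :: ms) = 0 :: (pvBreaks gap (m :: ms)).map (· + 1) := by
          unfold pvBreaks
          rw [hrange, List.filter_cons, hfilter]
          simp [h]
        rw [hb]
        simp only [pvCutsN, List.drop_zero, Nat.sub_zero, List.take_succ_cons, List.take_zero,
          Nat.zero_add]
        have hs := pvCutsN_shift c (m :: ms) (pvBreaks gap (m :: ms)) 0
        simp only [Nat.zero_add] at hs
        rw [hs, ih]
        simp [pvSessTop, pvSess, h, pvAttach]
      · have hb : pvBreaks gap (c :: m :: ms) = (pvBreaks gap (m :: ms)).map (· + 1) := by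
          unfold pvBreaks
          rw [hrange, List.filter_cons, hfilter]
          simp [h]
        rw [hb, pvCutsN_zero_shift, ih]
        simp [pvSessTop, pvSess, h, pvAttach]

theorem cut_to_session_eq (cl : List (List (String × Int))) (hour : Int) :
    cut_to_session cl hour = cut_to_session_alt cl hour := by
  have hA : cut_to_session cl hour = pvSessTop (hour * 3600) cl := by
    simp only [cut_to_session]
    refine (pvFoldA cl
      (fun i => pvMct (PySem.List.pyGetD cl i []) - pvMct (PySem.List.pyGetD cl (i - 1) []) > hour * 3600)
      (PySem.List.pyRange 1 (cl.length : Int) 1) [] 0).trans ?_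
    have hr : PySem.List.pyRange 1 (cl.length : Int) 1
        = (List.range (cl.length - 1)).map pvLift := by
      rw [PySem.List.pyRange_one]
      have hn : ((cl.length : Int) - 1).toNat = cl.length - 1 := by omega
      rw [hn]
      rfl
    have hf : (PySem.List.pyRange 1 (cl.length : Int) 1).filter
        (fun i => decide (pvMct (PySem.List.pyGetD cl i []) - pvMct (PySem.List.pyGetD cl (i - 1) []) > hour * 3600))
        = (pvBreaks (hour * 3600) cl).map pvLift := by
      rw [hr, List.filter_map]
      unfold pvBreaks
      congr 1
      refine List.filter_congr ?_
      intro k _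
      have h2 : pvLift k - 1 = ((k : Nat) : Int) := by unfold pvLift; ring
      simp only [Function.comp_apply]
      rw [h2, pvLift_eq]
      simp only [PySem.List.pyGetD_natCast, List.getD_eq_getElem?_getD]
    rw [List.nil_append, hf]
    have h0 := pvCuts_cast cl (pvBreaks (hour * 3600) cl) 0
    simp only [Nat.cast_zero] at h0
    rw [h0]
    exact pvCutsN_breaks (hour * 3600) cl
  have hB : cut_to_session_alt cl hour = pvSessTop (hour * 3600) cl := by
    simp only [cut_to_session_alt]
    cases cl with
    | nil => simp [pvSessTop]
    | cons c cs =>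
      simp only [List.foldl_cons, pvStepB]
      rw [pvFoldB (hour * 3600) cs [] ([] ++ [c]) c]
      simp [pvSessTop]
  rw [hA, hB]

-- ===== VERDICT (by name: the statement is the Claim_ definition above) =====
theorem cut_to_session_spec : Claim_equal_cut_to_session := by
  intro cl hour _ _
  unfold Spec_cut_to_session
  exact cut_to_session_eq cl hour
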